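-- pv_equiv track=rewrite | github.com/neo-astro/TFM-Aplicativo-web-para-el-analissi-de-sentimientos | backend/pythonapi/app/services/analyzer.py | _match_words
-- ===== SOURCE A (Python) =====
-- from typing import Dict, List, Tuple, Optional
--
-- def _has_negation(tokens: List[str], start_idx: int, window: int, negations: List[str]) -> bool:
--     begin = max(0, start_idx - window)
--     return any(tokens[i] in negations for i in range(begin, start_idx))
--
-- def _match_words(
--     tokens: List[str],
--     words: List[str],
--     negations: List[str],
--     polarity: int,
--     window: int = 2,
-- ) -> Tuple[int, List[str]]:
--     score = 0
--     matched = []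
--     words_set = set(words)
--     for i, token in enumerate(tokens):
--         if token in words_set:
--             negated = _has_negation(tokens, i, window, negations)
--             score += -polarity if negated else polarity
--             matched.append(token)
--     return score, matched
-- ===== SOURCE B (Python) =====
-- def _match_words(tokens, words, negations, polarity, window=2):
--     # Single forward pass: track the index of the most recent negation token
--     # instead of re-scanning a backward window at every matched word.
--     score = 0
--     matched = []
--     words_set = set(words)
--     neg_set = set(negations)
--     last_neg = None
--     for i, token in enumerate(tokens):
--         if token in words_set:
--             negated = last_neg is not None and last_neg >= i - window
--             score += -polarity if negated else polarity
--             matched.append(token)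
--         if token in neg_set:
--             last_neg = i
--     return score, matched
-- ===== Notes on version B (the rewrite author's own statement) =====
-- stated objective: faster
-- what changed: Replaces the per-match backward window scan (helper _has_negation re-scanning up to `window` previous tokens for every matched word) with a single forward pass that maintains the index of the most recently seen negation token and compares it against i - window.
import Mathlib
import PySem

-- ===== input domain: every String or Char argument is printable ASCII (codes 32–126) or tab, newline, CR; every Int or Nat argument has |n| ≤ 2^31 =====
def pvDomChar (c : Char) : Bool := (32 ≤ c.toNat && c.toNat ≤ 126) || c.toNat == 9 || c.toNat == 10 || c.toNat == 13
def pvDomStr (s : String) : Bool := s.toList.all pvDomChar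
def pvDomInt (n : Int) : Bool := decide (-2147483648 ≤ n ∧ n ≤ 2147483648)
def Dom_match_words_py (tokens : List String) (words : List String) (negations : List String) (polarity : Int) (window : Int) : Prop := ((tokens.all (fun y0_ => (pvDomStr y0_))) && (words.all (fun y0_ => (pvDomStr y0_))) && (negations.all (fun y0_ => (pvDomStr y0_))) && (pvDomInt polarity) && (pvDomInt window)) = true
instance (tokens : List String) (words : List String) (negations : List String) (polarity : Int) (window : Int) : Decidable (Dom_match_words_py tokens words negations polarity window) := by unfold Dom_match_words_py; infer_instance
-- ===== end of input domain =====

-- B replaces A's per-match backward window scan with one forward pass tracking the last negation index (objective: faster).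

-- ===== PORT A =====
-- pyGet? is exact here: _match_words only calls with 0 ≤ i < startIdx ≤ tokens.length
def hasNegation_py (tokens : List String) (startIdx : Int) (window : Int) (negations : List String) : Bool :=
  (PySem.List.pyRange (max 0 (startIdx - window)) startIdx 1).any
    (fun i => ((PySem.List.pyGet? tokens i).map (fun t => negations.contains t)).getD false)

def match_words_py (tokens : List String) (words : List String) (negations : List String) (polarity : Int) (window : Int) : Int × List String :=
  let wordsSet := PySem.Set.ofList words
  (PySem.List.enumerate tokens 0).foldl
    (fun (st : Int × List String) p =>
      if PySem.Set.contains wordsSet p.2 then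
        (st.1 + (if hasNegation_py tokens p.1 window negations then -polarity else polarity), st.2 ++ [p.2])
      else st)
    ((0 : Int), ([] : List String))

-- ===== PORT B =====
def match_words_py_alt (tokens : List String) (words : List String) (negations : List String) (polarity : Int) (window : Int) : Int × List String :=
  let wordsSet := PySem.Set.ofList words
  let negSet := PySem.Set.ofList negations
  let r := (PySem.List.enumerate tokens 0).foldl
    (fun (st : Int × List String × Option Int) p =>
      let st1 :=
        if PySem.Set.contains wordsSet p.2 then
          let negated := match st.2.2 with
            | some j => decide (p.1 - window ≤ j)
            | none => false
          (st.1 + (if negated then -polarity else polarity), st.2.1 ++ [p.2], st.2.2)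
        else st
      if PySem.Set.contains negSet p.2 then (st1.1, st1.2.1, some p.1) else st1)
    ((0 : Int), ([] : List String), (none : Option Int))
  (r.1, r.2.1)

-- ===== PRECONDITION & SPEC =====
def Spec_match_words_py (tokens : List String) (words : List String) (negations : List String) (polarity : Int) (window : Int) (out : Int × List String) : Prop := out = match_words_py_alt tokens words negations polarity window
instance (tokens : List String) (words : List String) (negations : List String) (polarity : Int) (window : Int) (out : Int × List String) : Decidable (Spec_match_words_py tokens words negations polarity window out) := by unfold Spec_match_words_py; infer_instance

-- ===== CLAIM (what is proved, stated in full; the proofs are below) =====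
def Claim_equal_match_words_py : Prop := ∀ (tokens : List String) (words : List String) (negations : List String) (polarity : Int) (window : Int), Dom_match_words_py tokens words negations polarity window → Spec_match_words_py tokens words negations polarity window (match_words_py tokens words negations polarity window)

-- ===== LEMMAS AND PROOFS =====

-- the fold step of port A, named for the proofs
def stepA (tokens : List String) (words : List String) (negations : List String) (polarity : Int) (window : Int) : (Int × List String) → (Int × String) → (Int × List String) :=
  fun st p =>
    if PySem.Set.contains (PySem.Set.ofList words) p.2 then
      (st.1 + (if hasNegation_py tokens p.1 window negations then -polarity else polarity), st.2 ++ [p.2])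
    else st

-- the fold step of port B, named for the proofs
def stepB (words : List String) (negations : List String) (polarity : Int) (window : Int) : (Int × List String × Option Int) → (Int × String) → (Int × List String × Option Int) :=
  fun st p =>
    let st1 :=
      if PySem.Set.contains (PySem.Set.ofList words) p.2 then
        let negated := match st.2.2 with
          | some j => decide (p.1 - window ≤ j)
          | none => false
        (st.1 + (if negated then -polarity else polarity), st.2.1 ++ [p.2], st.2.2)
      else st
    if PySem.Set.contains (PySem.Set.ofList negations) p.2 then (st1.1, st1.2.1, some p.1) else st1

lemma match_words_py_eq (tokens words negations : List String) (polarity window : Int) :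
    match_words_py tokens words negations polarity window =
      (PySem.List.enumerate tokens 0).foldl (stepA tokens words negations polarity window) (0, []) := rfl

lemma match_words_py_alt_eq (tokens words negations : List String) (polarity window : Int) :
    match_words_py_alt tokens words negations polarity window =
      (let r := (PySem.List.enumerate tokens 0).foldl (stepB words negations polarity window) (0, [], none)
       (r.1, r.2.1)) := rfl

-- whether tokens[j] is a negation token (false when j is out of range)
def negAt (tokens : List String) (negations : List String) (j : Int) : Bool :=
  ((PySem.List.pyGet? tokens j).map (fun t => negations.contains t)).getD false

-- invariant: B's last-negation state describes the negation tokens among indices < n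
def MWInv (tokens : List String) (negations : List String) (n : Nat) (ln : Option Int) : Prop :=
  (ln = none → ∀ j : Int, 0 ≤ j → j < (n : Int) → negAt tokens negations j = false) ∧
  (∀ j : Int, ln = some j → 0 ≤ j ∧ j < (n : Int) ∧ negAt tokens negations j = true ∧
      ∀ k : Int, j < k → k < (n : Int) → negAt tokens negations k = false)

lemma hasNeg_none (tokens negations : List String) (window : Int) (n : Nat)
    (h : ∀ j : Int, 0 ≤ j → j < (n : Int) → negAt tokens negations j = false) :
    hasNegation_py tokens (n : Int) window negations = false := by
  unfold hasNegation_py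
  rw [Bool.eq_false_iff]
  intro hc
  rw [List.any_eq_true] at hc
  rcases hc with ⟨i, hi, hp⟩
  rw [PySem.List.mem_pyRange_one] at hi
  have h0 : (0 : Int) ≤ i := le_trans (le_max_left _ _) hi.1
  have hf := h i h0 hi.2
  rw [negAt] at hf
  cases hg : PySem.List.pyGet? tokens i with
  | none => rw [hg] at hp; simp at hp
  | some t =>
    rw [hg] at hf hp
    simp only [Option.map_some, Option.getD_some] at hf hp
    rw [List.contains_eq_mem] at hf
    simp [hf] at hp

lemma hasNeg_some (tokens negations : List String) (window : Int) (n : Nat) (j : Int)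
    (hj0 : 0 ≤ j) (hjn : j < (n : Int)) (hjt : negAt tokens negations j = true)
    (hafter : ∀ k : Int, j < k → k < (n : Int) → negAt tokens negations k = false) :
    hasNegation_py tokens (n : Int) window negations = decide ((n : Int) - window ≤ j) := by
  unfold hasNegation_py
  by_cases hw : (n : Int) - window ≤ j
  · rw [decide_eq_true hw, List.any_eq_true]
    refine ⟨j, ?_, ?_⟩
    · rw [PySem.List.mem_pyRange_one]
      exact ⟨max_le (by omega) (by omega), hjn⟩
    · rw [negAt] at hjt
      cases hg : PySem.List.pyGet? tokens j with
      | none => rw [hg] at hjt; simp at hjt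
      | some t =>
        rw [hg] at hjt
        simp only [Option.map_some, Option.getD_some] at hjt
        rw [List.contains_eq_mem] at hjt
        simp [hjt]
  · rw [decide_eq_false hw, Bool.eq_false_iff]
    intro hc
    rw [List.any_eq_true] at hc
    rcases hc with ⟨i, hi, hp⟩
    rw [PySem.List.mem_pyRange_one] at hi
    have hji : j < i := by
      have := le_trans (le_max_right (0 : Int) ((n : Int) - window)) hi.1
      omega
    have hf := hafter i hji hi.2
    rw [negAt] at hf
    cases hg : PySem.List.pyGet? tokens i with
    | none => rw [hg] at hp; simp at hp
    | some t =>
      rw [hg] at hf hp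
      simp only [Option.map_some, Option.getD_some] at hf hp
      rw [List.contains_eq_mem] at hf
      simp [hf] at hp

lemma negAt_drop (tokens negations : List String) (n : Nat) (x : String) (rest : List String)
    (hd : tokens.drop n = x :: rest) :
    negAt tokens negations (n : Int) = negations.contains x := by
  have hget : tokens[n]? = some x := by
    have h0 : (tokens.drop n)[0]? = some x := by rw [hd]; rfl
    rwa [List.getElem?_drop, Nat.add_zero] at h0
  have hlen : n < tokens.length := (List.getElem?_eq_some_iff.mp hget).1
  rw [negAt]
  rw [show PySem.List.pyGet? tokens (n : Int) = tokens[n]? from by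
    simp [PySem.List.pyGet?, PySem.List.pyIdx?, hlen]]
  rw [hget]; rfl

lemma inv_step (tokens negations : List String) (n : Nat) (ln : Option Int)
    (x : String) (rest : List String) (hd : tokens.drop n = x :: rest)
    (h : MWInv tokens negations n ln) :
    MWInv tokens negations (n + 1)
      (if negations.contains x = true then some (n : Int) else ln) := by
  have hx := negAt_drop tokens negations n x rest hd
  by_cases hc : negations.contains x = true
  · rw [if_pos hc]
    constructor
    · intro hcontra; exact absurd hcontra (by simp)
    · intro j hj
      injection hj with hj; subst hj
      refine ⟨by positivity, by push_cast; omega, by rw [hx, hc], ?_⟩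
      intro k hk1 hk2; push_cast at hk2; omega
  · rw [if_neg hc]
    have hxf : negAt tokens negations (n : Int) = false := by
      rw [hx]; simpa using hc
    obtain ⟨hnone, hsome⟩ := h
    constructor
    · intro he j hj0 hj
      by_cases hjn : j = (n : Int)
      · rw [hjn]; exact hxf
      · exact hnone he j hj0 (by push_cast at hj; omega)
    · intro j hj
      obtain ⟨hj0, hjn, hjt, hafter⟩ := hsome j hj
      refine ⟨hj0, by push_cast; omega, hjt, ?_⟩
      intro k hk1 hk2
      by_cases hkn : k = (n : Int)
      · rw [hkn]; exact hxf
      · exact hafter k hk1 (by push_cast at hk2; omega)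

lemma stepAB (tokens words negations : List String) (polarity window : Int) (n : Nat)
    (x : String) (sc : Int) (m : List String) (ln : Option Int)
    (hinv : MWInv tokens negations n ln) :
    stepB words negations polarity window (sc, m, ln) ((n : Int), x) =
      ((stepA tokens words negations polarity window (sc, m) ((n : Int), x)).1,
       (stepA tokens words negations polarity window (sc, m) ((n : Int), x)).2,
       if negations.contains x = true then some (n : Int) else ln) := by
  have hneg : hasNegation_py tokens (n : Int) window negations =
      (match ln with | some j => decide ((n : Int) - window ≤ j) | none => false) := by
    cases ln with
    | none => exact hasNeg_none tokens negations window n (hinv.1 rfl)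
    | some j =>
      obtain ⟨hj0, hjn, hjt, hafter⟩ := hinv.2 j rfl
      exact hasNeg_some tokens negations window n j hj0 hjn hjt hafter
  have hcn : PySem.Set.contains (PySem.Set.ofList negations) x = negations.contains x := by
    simp [PySem.Set.contains, PySem.Set.mem_ofList, List.contains_eq_mem]
  simp only [stepA, stepB, hneg, hcn]
  cases ln <;> simp only [] <;> (try simp) <;> split_ifs <;> simp

lemma main_fold (tokens words negations : List String) (polarity window : Int) :
    ∀ (rest : List String) (n : Nat) (sc : Int) (m : List String) (ln : Option Int),
      tokens.drop n = rest →
      MWInv tokens negations n ln →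
      (PySem.List.enumerate rest (n : Int)).foldl
        (stepA tokens words negations polarity window) (sc, m) =
      (let r := (PySem.List.enumerate rest (n : Int)).foldl
        (stepB words negations polarity window) (sc, m, ln)
       (r.1, r.2.1)) := by
  intro rest
  induction rest with
  | nil => intro n sc m ln _ _; simp [PySem.List.enumerate_nil]
  | cons x rest ih =>
    intro n sc m ln hd hinv
    have hd' : tokens.drop (n + 1) = rest := by
      have h1 := congrArg (List.drop 1) hd
      rw [List.drop_drop] at h1
      simpa using h1
    have hcast : (n : Int) + 1 = ((n + 1 : Nat) : Int) := by push_cast; ring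
    rw [PySem.List.enumerate_cons]
    simp only [List.foldl_cons]
    rw [stepAB tokens words negations polarity window n x sc m ln hinv, hcast]
    have := ih (n + 1)
      (stepA tokens words negations polarity window (sc, m) ((n : Int), x)).1
      (stepA tokens words negations polarity window (sc, m) ((n : Int), x)).2
      (if negations.contains x = true then some (n : Int) else ln)
      hd' (inv_step tokens negations n ln x rest hd hinv)
    simpa using this

-- ===== VERDICT (by name: the statement is the Claim_ definition above) =====
theorem match_words_py_spec : Claim_equal_match_words_py := by
  intro tokens words negations polarity window _
  unfold Spec_match_words_py
  rw [match_words_py_eq, match_words_py_alt_eq]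
  have hinv0 : MWInv tokens negations 0 none := by
    constructor
    · intro _ j hj0 hj; omega
    · intro j hj; cases hj
  have h := main_fold tokens words negations polarity window tokens 0 0 [] none
    (by simp) hinv0
  simpa using h
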